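-- pv_equiv track=rewrite | github.com/ZolHo/AlgoProgramming | Leetcode/context/Dweekly-31/5458. 字符串的好分割数目.py | numSplits
-- ===== SOURCE A (Python) =====
-- from collections import Counter
--
-- def numSplits(s: str) -> int:
--     mm = Counter(s)
--     left = {}
--     ans = 0
--     l,r = 0, mm.__len__()
--     for i in s:
--         mm[i] -= 1
--         if i not in left:
--             left[i] = 1
--         else:
--             left[i]+=1
--         if mm[i] == 0:
--             mm.pop(i)
--         if mm.__len__()==left.__len__():
--             ans+=1
--     return ans
-- ===== SOURCE B (Python) =====
-- def numSplits(s: str) -> int: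
--     n = len(s)
--     suffix = [0] * n
--     seen = set()
--     for i in range(n - 1, -1, -1):
--         suffix[i] = len(seen)
--         seen.add(s[i])
--     left = set()
--     ans = 0
--     for i in range(n):
--         left.add(s[i])
--         if len(left) == suffix[i]:
--             ans += 1
--     return ans
-- ===== Notes on version B (the rewrite author's own statement) =====
-- stated objective: alternative
-- what changed: Replaces A's single forward pass that decrements a Counter of the whole string (popping exhausted keys) with a two-pass decomposition: a right-to-left scan precomputing a suffix-distinct-count table via a growing set, then a left-to-right scan with a growing prefix set comparing against the table.
import Mathlib
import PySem

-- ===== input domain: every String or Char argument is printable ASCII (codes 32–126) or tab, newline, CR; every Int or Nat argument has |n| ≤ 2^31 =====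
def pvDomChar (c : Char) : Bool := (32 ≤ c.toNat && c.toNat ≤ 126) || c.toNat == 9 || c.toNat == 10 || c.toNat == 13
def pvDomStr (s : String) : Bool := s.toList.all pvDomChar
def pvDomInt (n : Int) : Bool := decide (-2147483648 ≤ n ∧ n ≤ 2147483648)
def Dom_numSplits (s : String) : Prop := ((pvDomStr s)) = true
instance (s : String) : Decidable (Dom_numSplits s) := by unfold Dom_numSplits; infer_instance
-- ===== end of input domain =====

-- B replaces A's forward pass decrementing a Counter by a precomputed backward suffix-distinct table
-- plus a forward comparison pass (objective: alternative decomposition, same O(n) cost).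

-- ===== PORT A =====
-- A's loop body (the statement `l,r = 0, mm.__len__()` of A is dead code and is dropped).
def numSplitsStepA (st : PySem.Dict Char Int × PySem.Dict Char Int × Int) (i : Char) :
    PySem.Dict Char Int × PySem.Dict Char Int × Int :=
  let mm := st.1
  let left := st.2.1
  let ans := st.2.2
  let mm := mm.modify i 0 (· - 1)                 -- mm[i] -= 1
  let left := if left.contains i = false then left.insert i 1
              else left.insert i (left.getD i 0 + 1)
  let mm := if mm.getD i 0 == 0 then mm.erase i else mm   -- if mm[i] == 0: mm.pop(i)
  let ans := if mm.size == left.size then ans + 1 else ans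
  (mm, left, ans)

def numSplits (s : String) : Int :=
  let mm := PySem.Dict.counter s.toList
  let left : PySem.Dict Char Int := PySem.Dict.empty
  let ans : Int := 0
  (s.toList.foldl numSplitsStepA (mm, left, ans)).2.2

-- ===== PORT B =====
-- backward pass body: suffix[i] = len(seen); seen.add(s[i])
def numSplitsStepBsuf (cs : List Char) (st : List Int × PySem.Set Char) (i : Int) :
    List Int × PySem.Set Char :=
  (PySem.List.pySetD st.1 i (PySem.Set.len st.2), PySem.Set.add st.2 (PySem.List.pyGetD cs i ' '))

-- forward pass body: left.add(s[i]); if len(left) == suffix[i]: ans += 1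
def numSplitsStepBcnt (cs : List Char) (suffix : List Int) (st : PySem.Set Char × Int) (i : Int) :
    PySem.Set Char × Int :=
  let left := PySem.Set.add st.1 (PySem.List.pyGetD cs i ' ')
  (left, if PySem.Set.len left == PySem.List.pyGetD suffix i 0 then st.2 + 1 else st.2)

def numSplits_alt (s : String) : Int :=
  let cs := s.toList
  let n := cs.length
  let suffix := ((PySem.List.pyRange ((n : Int) - 1) (-1) (-1)).foldl (numSplitsStepBsuf cs)
      (List.replicate n 0, PySem.Set.empty)).1
  ((PySem.List.pyRange 0 (n : Int) 1).foldl (numSplitsStepBcnt cs suffix) (PySem.Set.empty, 0)).2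

-- ===== PRECONDITION & SPEC =====
def Spec_numSplits (s : String) (out : Int) : Prop := out = numSplits_alt s
instance (s : String) (out : Int) : Decidable (Spec_numSplits s out) := by unfold Spec_numSplits; infer_instance

-- ===== CLAIM (what is proved, stated in full; the proofs are below) =====
def Claim_equal_numSplits : Prop := ∀ (s : String), Dom_numSplits s → Spec_numSplits s (numSplits s)

-- ===== LEMMAS AND PROOFS =====

-- number of distinct characters of a list
def pvDistinct (xs : List Char) : Nat := (PySem.Set.ofList xs).length

-- number of good split indices k with i ≤ k < cs.length
def pvCnt (cs : List Char) (i : Nat) : Int :=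
  if _h : i < cs.length then
    (if pvDistinct (cs.take (i+1)) = pvDistinct (cs.drop (i+1)) then 1 else 0) + pvCnt cs (i+1)
  else 0
termination_by cs.length - i

-- a nodup list with the same members as m has pvDistinct m elements
lemma pvLen_eq_distinct (l m : List Char) (hl : l.Nodup) (h : ∀ x, x ∈ l ↔ x ∈ m) :
    l.length = pvDistinct m := by
  have hp : l.Perm (PySem.Set.ofList m) :=
    (List.perm_ext_iff_of_nodup hl (PySem.Set.nodup_ofList m)).2
      (fun x => (h x).trans (PySem.Set.mem_ofList m x).symm)
  exact hp.length_eq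

lemma pvKeys_erase {ν : Type} (d : PySem.Dict Char ν) (k : Char) :
    (d.erase k).keys = d.keys.filter (fun x => !(x == k)) := by
  simp only [PySem.Dict.erase, PySem.Dict.keys]
  induction d.items with
  | nil => rfl
  | cons p rest ih =>
    by_cases h : p.1 = k <;> simp [h, ih]

lemma pvGetD_erase_of_ne {ν : Type} (d : PySem.Dict Char ν) (k x : Char) (dflt : ν) (h : x ≠ k) :
    (d.erase k).getD x dflt = d.getD x dflt := by
  simp only [PySem.Dict.erase, PySem.Dict.getD, PySem.Dict.get?]
  congr 1
  induction d.items with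
  | nil => rfl
  | cons p rest ih =>
    rw [List.filter_cons]
    by_cases hk : p.1 = k
    · have h1 : (!p.1 == k) = false := by simp [hk]
      have h2 : (p.1 == x) = false := by simp [hk]; exact fun e => h e.symm
      rw [h1, if_neg (by simp), List.find?_cons, h2, ih]
    · have h1 : (!p.1 == k) = true := by simp [hk]
      rw [h1, if_pos rfl, List.find?_cons, List.find?_cons]
      by_cases hx : p.1 = x
      · simp [hx]
      · simp only [show (p.1 == x) = false by simp [hx]]
        exact ih

lemma pvSize_eq_keys_length {κ ν : Type} (d : PySem.Dict κ ν) : d.size = d.keys.length := by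
  simp [PySem.Dict.size, PySem.Dict.keys]

lemma pvGetD_erase_self {ν : Type} (d : PySem.Dict Char ν) (k : Char) (dflt : ν) :
    (d.erase k).getD k dflt = dflt := by
  simp only [PySem.Dict.erase, PySem.Dict.getD, PySem.Dict.get?]
  have hf : List.find? (fun p => p.1 == k) (d.items.filter (fun p => !p.1 == k)) = none := by
    refine List.find?_eq_none.2 (fun p hp => ?_)
    have := (List.mem_filter.1 hp).2
    simpa using this
  rw [hf]
  rfl

-- A's loop invariant
lemma pvAloop (cs : List Char) : ∀ (r p : List Char) (mm left : PySem.Dict Char Int) (ans : Int),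
    cs = p ++ r →
    mm.keys.Nodup → (∀ x, x ∈ mm.keys ↔ x ∈ r) → (∀ x, mm.getD x 0 = (r.count x : Int)) →
    left.keys.Nodup → (∀ x, x ∈ left.keys ↔ x ∈ p) →
    (r.foldl numSplitsStepA (mm, left, ans)).2.2 = ans + pvCnt cs p.length := by
  intro r
  induction r with
  | nil =>
    intro p mm left ans hcs _ _ _ _ _
    rw [List.foldl_nil, pvCnt]
    have : ¬ p.length < cs.length := by simp [hcs]
    rw [dif_neg this]
    ring
  | cons c r' ih =>
    intro p mm left ans hcs hmmnd hmmmem hmmval hlnd hlmem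
    have hcmem : c ∈ mm.keys := (hmmmem c).2 (by simp)
    have hccont : mm.contains c = true := (PySem.Dict.contains_iff_mem_keys mm c).2 hcmem
    set mm1 := mm.modify c 0 (· - 1) with hmm1def
    have hmm1keys : mm1.keys = mm.keys := by
      rw [hmm1def, PySem.Dict.keys_modify, PySem.Dict.keys_insert_of_contains mm _ hccont]
    have hmm1val : ∀ x, mm1.getD x 0 = if x = c then ((c :: r').count x : Int) - 1 else ((c :: r').count x : Int) := by
      intro x
      rw [hmm1def, PySem.Dict.getD_modify]
      by_cases hx : x = c
      · subst hx; rw [if_pos rfl, if_pos rfl, hmmval]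
      · rw [if_neg hx, if_neg hx, hmmval]
    have hmm1c : mm1.getD c 0 = (r'.count c : Int) := by
      rw [hmm1val c, if_pos rfl]
      simp
    set left1 := if left.contains c = false then left.insert c 1 else left.insert c (left.getD c 0 + 1) with hl1def
    have hl1nd : left1.keys.Nodup := by
      rw [hl1def]
      by_cases hlc : left.contains c = false
      · rw [if_pos hlc, PySem.Dict.keys_insert_of_not_contains left _ hlc]
        have hcnot : c ∉ left.keys := fun hm => by
          have h2 := (PySem.Dict.contains_iff_mem_keys left c).2 hm
          rw [hlc] at h2
          simp at h2
        refine List.nodup_append.2 ⟨hlnd, List.nodup_singleton c, ?_⟩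
        exact fun a ha b hb => by
          rw [List.mem_singleton] at hb
          subst hb
          exact fun he => hcnot (he ▸ ha)
      · rw [if_neg hlc, PySem.Dict.keys_insert_of_contains left _ (by revert hlc; cases left.contains c <;> simp)]
        exact hlnd
    have hl1mem : ∀ x, x ∈ left1.keys ↔ x ∈ p ++ [c] := by
      intro x
      rw [hl1def]
      by_cases hlc : left.contains c = false
      · rw [if_pos hlc, PySem.Dict.keys_insert_of_not_contains left _ hlc]
        simp [hlmem x]
      · have hc : left.contains c = true := by revert hlc; cases left.contains c <;> simp
        rw [if_neg hlc, PySem.Dict.keys_insert_of_contains left _ hc]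
        have hcp : c ∈ p := (hlmem c).1 ((PySem.Dict.contains_iff_mem_keys left c).1 hc)
        simp only [List.mem_append, List.mem_singleton]
        constructor
        · exact fun hx => Or.inl ((hlmem x).1 hx)
        · intro hx
          rcases hx with hx | hx
          · exact (hlmem x).2 hx
          · exact (hlmem x).2 (by rw [hx]; exact hcp)
    set mm2 := if mm1.getD c 0 == 0 then mm1.erase c else mm1 with hmm2def
    have hmm2nd : mm2.keys.Nodup := by
      rw [hmm2def]
      split
      · rw [pvKeys_erase, hmm1keys]; exact hmmnd.filter _
      · rw [hmm1keys]; exact hmmnd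
    have hmm2mem : ∀ x, x ∈ mm2.keys ↔ x ∈ r' := by
      intro x
      rw [hmm2def]
      split
      · next hz =>
        have hc0 : r'.count c = 0 := by
          have hz' : mm1.getD c 0 = 0 := by simpa using hz
          rw [hmm1c] at hz'
          exact_mod_cast hz'
        have hcnot : c ∉ r' := List.count_eq_zero.1 hc0
        rw [pvKeys_erase, hmm1keys]
        simp only [List.mem_filter, hmmmem x, List.mem_cons, Bool.not_eq_eq_eq_not, Bool.not_true,
          beq_eq_false_iff_ne, ne_eq]
        constructor
        · rintro ⟨(rfl | hx), hne⟩
          · exact absurd rfl hne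
          · exact hx
        · exact fun hx => ⟨Or.inr hx, fun he => hcnot (he ▸ hx)⟩
      · next hz =>
        have hcr' : c ∈ r' := by
          have hz' : mm1.getD c 0 ≠ 0 := by simpa using hz
          rw [hmm1c] at hz'
          have : r'.count c ≠ 0 := fun h0 => hz' (by exact_mod_cast h0)
          exact List.count_pos_iff.1 (Nat.pos_of_ne_zero this)
        rw [hmm1keys]
        rw [hmmmem x]
        simp only [List.mem_cons]
        constructor
        · rintro (rfl | hx)
          · exact hcr'
          · exact hx
        · exact fun hx => Or.inr hx
    have hmm2val : ∀ x, mm2.getD x 0 = (r'.count x : Int) := by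
      intro x
      rw [hmm2def]
      split
      · next hz =>
        have hc0 : r'.count c = 0 := by
          have hz' : mm1.getD c 0 = 0 := by simpa using hz
          rw [hmm1c] at hz'
          exact_mod_cast hz'
        by_cases hx : x = c
        · subst hx
          rw [pvGetD_erase_self, hc0]
          simp
        · rw [pvGetD_erase_of_ne _ _ _ _ hx, hmm1val x, if_neg hx]
          rw [List.count_cons]
          simp [Ne.symm hx]
      · by_cases hx : x = c
        · subst hx; rw [hmm1c]
        · rw [hmm1val x, if_neg hx, List.count_cons]
          simp [Ne.symm hx]
    have hstep : numSplitsStepA (mm, left, ans) c =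
        (mm2, left1, if mm2.size == left1.size then ans + 1 else ans) := rfl
    rw [List.foldl_cons, hstep]
    have hcs' : cs = (p ++ [c]) ++ r' := by simp [hcs]
    have := ih (p ++ [c]) mm2 left1 (if mm2.size == left1.size then ans + 1 else ans)
      hcs' hmm2nd hmm2mem hmm2val hl1nd hl1mem
    rw [this]
    have hlen : (p ++ [c]).length = p.length + 1 := by simp
    rw [hlen]
    -- identify the condition with pvCnt's condition
    have hms : mm2.size = pvDistinct r' := by
      rw [pvSize_eq_keys_length]
      exact pvLen_eq_distinct _ _ hmm2nd hmm2mem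
    have hls : left1.size = pvDistinct (p ++ [c]) := by
      rw [pvSize_eq_keys_length]
      exact pvLen_eq_distinct _ _ hl1nd hl1mem
    have htake : cs.take (p.length + 1) = p ++ [c] := by
      rw [hcs']
      exact List.take_left' hlen
    have hdrop : cs.drop (p.length + 1) = r' := by
      rw [hcs']
      exact List.drop_left' hlen
    have hplt : p.length < cs.length := by
      rw [hcs]; simp
    conv_rhs => rw [pvCnt]
    rw [dif_pos hplt, htake, hdrop, hms, hls]
    by_cases hd : pvDistinct (p ++ [c]) = pvDistinct r'
    · rw [if_pos hd, if_pos (by simpa using hd.symm)]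
      ring
    · rw [if_neg hd, if_neg (by simpa using fun e => hd (Eq.symm e))]
      ring
-- B's backward pass builds the suffix-distinct table
lemma pvBsuf (cs : List Char) : ∀ (i : Nat), i ≤ cs.length →
    ∀ (suf : List Int) (seen : PySem.Set Char), suf.length = cs.length →
    seen.Nodup → (∀ x, x ∈ seen ↔ x ∈ cs.drop i) →
    ((PySem.List.pyRange ((i : Int) - 1) (-1) (-1)).foldl (numSplitsStepBsuf cs) (suf, seen)).1 =
      (List.range i).map (fun k => (pvDistinct (cs.drop (k+1)) : Int)) ++ suf.drop i := by
  intro i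
  induction i with
  | zero =>
    intro _ suf seen _ _ _
    rw [show ((0 : Nat) : Int) - 1 = -1 by norm_num, PySem.List.pyRange_neg_one_eq_nil le_rfl]
    simp
  | succ i ih =>
    intro hi suf seen hlen hnd hseen
    have hi' : i < cs.length := hi
    rw [show ((i + 1 : Nat) : Int) - 1 = (i : Int) by push_cast; ring,
      PySem.List.pyRange_neg_one_cons (by omega), List.foldl_cons]
    have hget : PySem.List.pyGetD cs (i : Int) ' ' = cs[i] := by
      rw [PySem.List.pyGetD_natCast, List.getD_eq_getElem cs ' ' hi']
    have hstep : numSplitsStepBsuf cs (suf, seen) (i : Int) =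
        (suf.set i (PySem.Set.len seen), PySem.Set.add seen cs[i]) := by
      simp only [numSplitsStepBsuf, PySem.List.pySetD_natCast, hget]
    rw [hstep]
    have hmem1 : ∀ x, x ∈ PySem.Set.add seen cs[i] ↔ x ∈ cs.drop i := by
      intro x
      rw [PySem.Set.mem_add, List.drop_eq_getElem_cons hi', List.mem_cons, hseen x]
      tauto
    have := ih (Nat.le_of_succ_le hi) (suf.set i (PySem.Set.len seen)) (PySem.Set.add seen cs[i])
      (by simpa using hlen) (PySem.Set.nodup_add seen _ hnd) hmem1
    have hdropset : (suf.set i (PySem.Set.len seen)).drop i = PySem.Set.len seen :: suf.drop (i+1) := by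
      rw [List.drop_eq_getElem_cons (by simpa [hlen] using hi')]
      rw [List.getElem_set_self]
      simp [List.drop_set]
    have hval : PySem.Set.len seen = (pvDistinct (cs.drop (i+1)) : Int) := by
      simp only [PySem.Set.len]
      exact_mod_cast pvLen_eq_distinct seen (cs.drop (i+1)) hnd hseen
    rw [this, hdropset, hval, List.range_succ, List.map_append]
    simp

-- B's forward pass counts
lemma pvBcnt (cs : List Char) (suffix : List Int)
    (hsuf : suffix = (List.range cs.length).map (fun k => (pvDistinct (cs.drop (k+1)) : Int))) :
    ∀ (fuel i : Nat), cs.length - i = fuel → i ≤ cs.length →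
    ∀ (left : PySem.Set Char) (ans : Int), left.Nodup → (∀ x, x ∈ left ↔ x ∈ cs.take i) →
    ((PySem.List.pyRange (i : Int) (cs.length : Int) 1).foldl (numSplitsStepBcnt cs suffix) (left, ans)).2 =
      ans + pvCnt cs i := by
  intro fuel
  induction fuel with
  | zero =>
    intro i hfuel hi left ans _ _
    have hieq : i = cs.length := by omega
    subst hieq
    rw [PySem.List.pyRange_one_eq_nil le_rfl, List.foldl_nil, pvCnt, dif_neg (by omega)]
    ring
  | succ fuel ih =>
    intro i hfuel hi left ans hnd hmem
    have hi' : i < cs.length := by omega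
    rw [PySem.List.pyRange_one_cons (by exact_mod_cast hi'), List.foldl_cons]
    have hget : PySem.List.pyGetD cs (i : Int) ' ' = cs[i] := by
      rw [PySem.List.pyGetD_natCast, List.getD_eq_getElem cs ' ' hi']
    have hsufget : PySem.List.pyGetD suffix (i : Int) 0 = (pvDistinct (cs.drop (i+1)) : Int) := by
      rw [PySem.List.pyGetD_natCast, List.getD_eq_getElem suffix 0 (by simp [hsuf, hi'])]
      simp [hsuf]
    have hmem1 : ∀ x, x ∈ PySem.Set.add left cs[i] ↔ x ∈ cs.take (i+1) := by
      intro x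
      rw [PySem.Set.mem_add, List.take_add_one, List.mem_append, hmem x]
      simp only [List.getElem?_eq_getElem hi', Option.toList_some, List.mem_singleton]
    have hlen1 : PySem.Set.len (PySem.Set.add left cs[i]) = (pvDistinct (cs.take (i+1)) : Int) := by
      simp only [PySem.Set.len]
      exact_mod_cast pvLen_eq_distinct _ _ (PySem.Set.nodup_add left _ hnd) hmem1
    have hstep : numSplitsStepBcnt cs suffix (left, ans) (i : Int) =
        (PySem.Set.add left cs[i],
         if (pvDistinct (cs.take (i+1)) : Int) == (pvDistinct (cs.drop (i+1)) : Int) then ans + 1 else ans) := by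
      simp only [numSplitsStepBcnt, hget, hsufget, hlen1]
    rw [hstep, show (i : Int) + 1 = ((i + 1 : Nat) : Int) by push_cast; ring]
    rw [ih (i+1) (by omega) (by omega) _ _ (PySem.Set.nodup_add left _ hnd) hmem1]
    conv_rhs => rw [pvCnt]
    rw [dif_pos hi']
    by_cases hd : pvDistinct (cs.take (i+1)) = pvDistinct (cs.drop (i+1))
    · rw [if_pos (by simpa using congrArg (Nat.cast (R := Int)) hd), if_pos hd]
      ring
    · rw [if_neg (by simpa using fun e => hd (by exact_mod_cast e)), if_neg hd]
      ring

-- ===== VERDICT (by name: the statement is the Claim_ definition above) =====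
theorem numSplits_spec : Claim_equal_numSplits := by
  intro s _
  unfold Spec_numSplits numSplits numSplits_alt
  set cs := s.toList with hcs
  have hA : (cs.foldl numSplitsStepA (PySem.Dict.counter cs, PySem.Dict.empty, 0)).2.2 =
      0 + pvCnt cs 0 := by
    refine pvAloop cs cs [] (PySem.Dict.counter cs) PySem.Dict.empty 0 rfl
      (PySem.Dict.nodup_keys_counter cs) ?_ (fun x => PySem.Dict.getD_counter cs x) ?_ ?_
    · intro x
      rw [PySem.Dict.keys_counter]
      exact PySem.Set.mem_ofList cs x
    · simp [PySem.Dict.keys_empty]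
    · intro x
      simp [PySem.Dict.keys_empty]
  have hsuffix : ((PySem.List.pyRange ((cs.length : Int) - 1) (-1) (-1)).foldl (numSplitsStepBsuf cs)
      (List.replicate cs.length 0, PySem.Set.empty)).1 =
      (List.range cs.length).map (fun k => (pvDistinct (cs.drop (k+1)) : Int)) := by
    have := pvBsuf cs cs.length le_rfl (List.replicate cs.length 0) PySem.Set.empty
      (by simp) (by simp [PySem.Set.empty]) (by simp [PySem.Set.empty])
    simpa using this
  have hB : ((PySem.List.pyRange 0 (cs.length : Int) 1).foldl
      (numSplitsStepBcnt cs ((List.range cs.length).map (fun k => (pvDistinct (cs.drop (k+1)) : Int))))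
      (PySem.Set.empty, 0)).2 = 0 + pvCnt cs 0 := by
    have := pvBcnt cs _ rfl cs.length 0 (by omega) (by omega) PySem.Set.empty 0
      (by simp [PySem.Set.empty]) (by simp [PySem.Set.empty])
    simpa using this
  simp only [hsuffix]
  rw [hA, hB]
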